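-- pv_equiv track=rewrite | github.com/ihyatafsir/mahquranapp | scripts/smart_align.py | group_timing_into_words
-- ===== SOURCE A (Python) =====
-- def group_timing_into_words(timing_data, gap_threshold_ms=15):
--     """Group timing entries into words based on timing gaps."""
--     words = []
--     current_word = []
--
--     for i, entry in enumerate(timing_data):
--         if i > 0:
--             prev_end = timing_data[i-1].get('end', 0)
--             curr_start = entry.get('start', 0)
--             gap = curr_start - prev_end
--             if gap > gap_threshold_ms:
--                 if current_word:
--                     words.append(current_word)
--                 current_word = []
--         current_word.append(entry)
--
--     if current_word:
--         words.append(current_word)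
--
--     return words
-- ===== SOURCE B (Python) =====
-- def group_timing_into_words(timing_data, gap_threshold_ms=15):
--     """Group timing entries into words based on timing gaps."""
--     n = len(timing_data)
--     cuts = [i for i in range(1, n)
--             if timing_data[i].get('start', 0) - timing_data[i - 1].get('end', 0) > gap_threshold_ms]
--     bounds = [0] + cuts + [n]
--     return [timing_data[a:b] for a, b in zip(bounds, bounds[1:]) if a < b]
-- ===== Notes on version B (the rewrite author's own statement) =====
-- stated objective: alternative
-- what changed: Replaces A's incremental current-word accumulator loop with a two-pass boundary table: one comprehension collects the break indices, then the words are produced by slicing timing_data between consecutive boundaries.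
import Mathlib
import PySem

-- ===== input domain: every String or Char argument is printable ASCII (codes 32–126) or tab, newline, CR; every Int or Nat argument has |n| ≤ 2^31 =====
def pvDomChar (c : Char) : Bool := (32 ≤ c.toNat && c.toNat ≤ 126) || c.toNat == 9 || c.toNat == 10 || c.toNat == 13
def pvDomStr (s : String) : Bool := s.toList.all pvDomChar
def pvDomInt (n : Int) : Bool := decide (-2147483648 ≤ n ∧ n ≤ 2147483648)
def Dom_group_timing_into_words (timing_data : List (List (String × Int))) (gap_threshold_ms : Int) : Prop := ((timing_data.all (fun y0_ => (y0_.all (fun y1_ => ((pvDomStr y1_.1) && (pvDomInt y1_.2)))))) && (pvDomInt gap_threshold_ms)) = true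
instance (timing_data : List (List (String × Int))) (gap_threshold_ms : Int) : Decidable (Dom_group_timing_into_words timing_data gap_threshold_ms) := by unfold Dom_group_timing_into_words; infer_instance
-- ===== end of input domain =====

-- B replaces A's incremental current-word accumulator loop with a two-pass boundary table
-- (collect break indices, then slice between consecutive bounds); alternative decomposition, same cost.


-- shared helper: d.get(k, dflt) on an association list (first match)
def pvGet (d : List (String × Int)) (k : String) (dflt : Int) : Int :=
  ((d.find? (fun p => p.1 == k)).map Prod.snd).getD dflt

-- ===== PORT A =====
-- loop body of A (state = (words, current_word); ie = (i, entry))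
def pvStepA (td : List (List (String × Int))) (g : Int)
    (st : List (List (List (String × Int))) × List (List (String × Int)))
    (ie : Int × List (String × Int)) :
    List (List (List (String × Int))) × List (List (String × Int)) :=
  let wc :=
    if ie.1 > 0 then
      let prev_end := pvGet (PySem.List.pyGetD td (ie.1 - 1) []) "end" 0
      let curr_start := pvGet ie.2 "start" 0
      let gap := curr_start - prev_end
      if gap > g then ((if st.2 = [] then st.1 else st.1 ++ [st.2]), ([] : List (List (String × Int))))
      else (st.1, st.2)
    else (st.1, st.2)
  (wc.1, wc.2 ++ [ie.2])

def group_timing_into_words (timing_data : List (List (String × Int))) (gap_threshold_ms : Int) : List (List (List (String × Int))) :=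
  let st := (PySem.List.enumerate timing_data 0).foldl (pvStepA timing_data gap_threshold_ms) ([], [])
  if st.2 = [] then st.1 else st.1 ++ [st.2]

-- ===== PORT B =====
-- the gap test of B's comprehension: a break right before entry i
def pvBrk (td : List (List (String × Int))) (g : Int) (i : Int) : Bool :=
  pvGet (PySem.List.pyGetD td i []) "start" 0 - pvGet (PySem.List.pyGetD td (i - 1) []) "end" 0 > g

def group_timing_into_words_alt (timing_data : List (List (String × Int))) (gap_threshold_ms : Int) : List (List (List (String × Int))) :=
  let n : Int := timing_data.length
  let cuts := (PySem.List.pyRange 1 n 1).filter (pvBrk timing_data gap_threshold_ms)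
  let bounds := (0 : Int) :: cuts ++ [n]
  (((bounds.zip bounds.tail).filter (fun ab => ab.1 < ab.2)).map
    (fun ab => PySem.List.slice timing_data (some ab.1) (some ab.2)))

-- ===== PRECONDITION & SPEC =====
def Spec_group_timing_into_words (timing_data : List (List (String × Int))) (gap_threshold_ms : Int) (out : List (List (List (String × Int)))) : Prop := out = group_timing_into_words_alt timing_data gap_threshold_ms
instance (timing_data : List (List (String × Int))) (gap_threshold_ms : Int) (out : List (List (List (String × Int)))) : Decidable (Spec_group_timing_into_words timing_data gap_threshold_ms out) := by unfold Spec_group_timing_into_words; infer_instance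

-- ===== CLAIM (what is proved, stated in full; the proofs are below) =====
def Claim_equal_group_timing_into_words : Prop := ∀ (timing_data : List (List (String × Int))) (gap_threshold_ms : Int), Dom_group_timing_into_words timing_data gap_threshold_ms → Spec_group_timing_into_words timing_data gap_threshold_ms (group_timing_into_words timing_data gap_threshold_ms)

-- ===== LEMMAS AND PROOFS =====

-- break test at a Nat index
def pvBrkN (td : List (List (String × Int))) (g : Int) (j : Nat) : Bool := pvBrk td g (j : Int)

-- canonical chunking of td between a and the cut points (then to the end n)
def chunksN (td : List (List (String × Int))) (n : Nat) (a : Nat) :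
    List Nat → List (List (List (String × Int)))
  | [] => [(td.drop a).take (n - a)]
  | c :: cs => (td.drop a).take (c - a) :: chunksN td n c cs

theorem pvBrkN_eq (td : List (List (String × Int))) (g : Int) (k : Nat) (hk : 1 ≤ k) :
    pvBrkN td g k =
      decide (pvGet (PySem.List.pyGetD td (k : Int) []) "start" 0
        - pvGet (td.getD (k - 1) []) "end" 0 > g) := by
  have : ((k : Int) - 1) = ((k - 1 : Nat) : Int) := by omega
  simp [pvBrkN, pvBrk, this, PySem.List.pyGetD_natCast]

theorem getD_append_len (pre l : List (List (String × Int))) (y : List (String × Int)) :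
    (pre ++ y :: l).getD pre.length [] = y := by
  simp [List.getD]

theorem foldA (td : List (List (String × Int))) (g : Int) :
    ∀ (xs pre : List (List (String × Int))) (ws : List (List (List (String × Int)))) (a : Nat),
      td = pre ++ xs → a < pre.length →
      (let st := (PySem.List.enumerate xs (pre.length : Int)).foldl (pvStepA td g)
          (ws, (td.drop a).take (pre.length - a));
       if st.2 = [] then st.1 else st.1 ++ [st.2])
      = ws ++ chunksN td td.length a
          ((List.range' pre.length (td.length - pre.length)).filter (pvBrkN td g)) := by
  intro xs
  induction xs with
  | nil =>
    intro pre ws a htd ha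
    subst htd
    have hcw : ((pre ++ []).drop a).take (pre.length - a) ≠ [] := by
      intro h
      have := congrArg List.length h
      simp at this
      omega
    simp [PySem.List.enumerate_nil, chunksN]
    omega
  | cons y ys ih =>
    intro pre ws a htd ha
    have hk1 : 1 ≤ pre.length := by omega
    have hk0 : 0 < pre.length := hk1
    have hlen : td.length = pre.length + (ys.length + 1) := by
      subst htd; simp
    have hdropk : td.drop pre.length = y :: ys := by
      subst htd; simp
    have hgetk : PySem.List.pyGetD td (pre.length : Int) [] = y := by
      rw [PySem.List.pyGetD_natCast]
      subst htd; exact getD_append_len pre ys y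
    have hcw : ((td.drop a).take (pre.length - a)) ≠ [] := by
      intro h
      have := congrArg List.length h
      simp at this
      omega
    have hrange : List.range' pre.length (td.length - pre.length)
        = pre.length :: List.range' (pre.length + 1) (td.length - (pre.length + 1)) := by
      have h1 : td.length - pre.length = (td.length - (pre.length + 1)) + 1 := by omega
      rw [h1, List.range'_succ]
    have hgetk1 : td.getD (pre.length - 1) [] = PySem.List.pyGetD td ((pre.length : Int) - 1) [] := by
      have h2 : ((pre.length : Int) - 1) = ((pre.length - 1 : Nat) : Int) := by omega
      rw [h2, PySem.List.pyGetD_natCast]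
    have hlen2 : (pre ++ [y]).length = pre.length + 1 := by simp
    rw [PySem.List.enumerate_cons, List.foldl_cons]
    by_cases hb : pvGet y "start" 0 - pvGet (PySem.List.pyGetD td ((pre.length : Int) - 1) []) "end" 0 > g
    · -- break before y: close the current word, start [y]
      have hstep : pvStepA td g (ws, (td.drop a).take (pre.length - a)) ((pre.length : Int), y)
          = (ws ++ [(td.drop a).take (pre.length - a)], [y]) := by
        simp [pvStepA, hk0, hb, hcw]
      have hbn : pvBrkN td g pre.length = true := by
        rw [pvBrkN_eq td g pre.length hk1, hgetk, hgetk1]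
        simpa using hb
      rw [hstep]
      have hih := ih (pre ++ [y]) (ws ++ [(td.drop a).take (pre.length - a)]) pre.length
        (by subst htd; simp) (by simp [hlen2])
      rw [hlen2] at hih
      push_cast at hih
      rw [Nat.add_sub_cancel_left, hdropk] at hih
      have ht1 : List.take 1 (y :: ys) = [y] := rfl
      rw [ht1] at hih
      rw [hih, hrange, List.filter_cons_of_pos hbn]
      simp [chunksN]
    · -- no break: extend the current word with y
      have hstep : pvStepA td g (ws, (td.drop a).take (pre.length - a)) ((pre.length : Int), y)
          = (ws, (td.drop a).take (pre.length - a) ++ [y]) := by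
        simp [pvStepA, hk0, hb]
      have hbn : pvBrkN td g pre.length = false := by
        rw [pvBrkN_eq td g pre.length hk1, hgetk, hgetk1]
        simpa using hb
      have hext : (td.drop a).take (pre.length - a) ++ [y]
          = (td.drop a).take (pre.length + 1 - a) := by
        have h1 : pre.length + 1 - a = (pre.length - a) + 1 := by omega
        rw [h1, List.take_add_one]
        have hidx : (td.drop a)[pre.length - a]? = some y := by
          rw [List.getElem?_drop]
          have h2 : a + (pre.length - a) = pre.length := by omega
          rw [h2]
          subst htd
          simp
        simp [hidx]
      rw [hstep]
      have hih := ih (pre ++ [y]) ws a (by subst htd; simp) (by simp [hlen2]; omega)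
      rw [hlen2] at hih
      push_cast at hih
      rw [← hext] at hih
      rw [hih, hrange, List.filter_cons_of_neg (by simp [hbn])]

theorem zipSlice (td : List (List (String × Int))) (n : Nat) (_hn : n = td.length) :
    ∀ (cs : List Nat) (a : Nat), a < n → (∀ c ∈ cs, a < c ∧ c < n) → cs.Pairwise (· < ·) →
      (((((a : Nat) : Int) :: (cs.map (Nat.cast) ++ [(n : Int)])).zip (cs.map (Nat.cast) ++ [(n : Int)])).filter
          (fun ab => ab.1 < ab.2)).map (fun ab => PySem.List.slice td (some ab.1) (some ab.2))
      = chunksN td n a cs := by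
  intro cs
  induction cs with
  | nil =>
    intro a han _ _
    have : ((a : Int) < (n : Int)) := by exact_mod_cast han
    simp [this, chunksN, PySem.List.slice_natCast]
  | cons c cs' ih =>
    intro a han hmem hpw
    have hac : a < c := (hmem c (by simp)).1
    have hcn : c < n := (hmem c (by simp)).2
    have haci : ((a : Int) < (c : Int)) := by exact_mod_cast hac
    have hih := ih c hcn
      (fun c' hc' => ⟨(List.rel_of_pairwise_cons hpw hc'), (hmem c' (by simp [hc'])).2⟩)
      (hpw.sublist (List.sublist_cons_self c cs'))
    simp only [List.map_cons, List.cons_append, List.zip_cons_cons, List.filter_cons,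
      haci, decide_true, if_true, chunksN, PySem.List.slice_natCast]
    rw [hih]

theorem pyRange_cast (k n : Nat) :
    PySem.List.pyRange (k : Int) (n : Int) 1 = (List.range' k (n - k)).map (Nat.cast) := by
  rw [PySem.List.pyRange_one, List.range'_eq_map_range]
  have h1 : ((n : Int) - (k : Int)).toNat = n - k := by omega
  rw [h1, List.map_map]
  apply List.map_congr_left
  intro j _
  simp


-- ===== VERDICT (by name: the statement is the Claim_ definition above) =====
theorem group_timing_into_words_spec : Claim_equal_group_timing_into_words := by
  intro td g _
  unfold Spec_group_timing_into_words
  cases td with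
  | nil =>
    simp [group_timing_into_words, group_timing_into_words_alt,
      PySem.List.enumerate_nil, PySem.List.pyRange_one_eq_nil]
  | cons x xs =>
    have hfirst : PySem.List.enumerate (x :: xs) 0 = (0, x) :: PySem.List.enumerate xs 1 := by
      simp [PySem.List.enumerate_cons]
    have hA := foldA (x :: xs) g xs [x] [] 0 (by simp) (by simp)
    have hstep0 : pvStepA (x :: xs) g ([], []) (0, x) = ([], [x]) := by
      simp [pvStepA]
    have hA' : group_timing_into_words (x :: xs) g
        = chunksN (x :: xs) (x :: xs).length 0
            ((List.range' 1 ((x :: xs).length - 1)).filter (pvBrkN (x :: xs) g)) := by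
      unfold group_timing_into_words
      rw [hfirst, List.foldl_cons, hstep0]
      have h1 : ([x] : List (List (String × Int))) = ((x :: xs).drop 0).take (([x] : List (List (String × Int))).length - 0) := by simp
      simp only [List.length_cons] at hA
      simpa using hA
    rw [hA']
    -- B side
    have hconv : PySem.List.pyRange 1 ((x :: xs).length : Int) 1
        = (List.range' 1 ((x :: xs).length - 1)).map (Nat.cast) := by
      have := pyRange_cast 1 (x :: xs).length
      simpa using this
    have hpred : ((pvBrk (x :: xs) g) ∘ (Nat.cast : Nat → Int)) = pvBrkN (x :: xs) g := by
      funext j; simp [pvBrkN, Function.comp]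
    have hz := zipSlice (x :: xs) (x :: xs).length rfl
      ((List.range' 1 ((x :: xs).length - 1)).filter (pvBrkN (x :: xs) g)) 0
      (by simp)
      (by
        intro c hc
        have := List.mem_filter.mp hc
        have hm := List.mem_range'.mp this.1
        constructor <;> omega)
      (by
        have h := List.pairwise_lt_range' (s := 1) (n := (x :: xs).length - 1) (step := 1)
        exact h.filter _)
    rw [group_timing_into_words_alt]
    simp only [hconv, List.filter_map, hpred]
    simpa using hz.symm
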